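-- pv_equiv track=rewrite | github.com/Haksell/codeforces | problems/1861B.py | solve
-- ===== SOURCE A (Python) =====
-- def solve(a, b):
--     s = a[0]
--     e = a[-1]
--     if b[0] != s or b[-1] != e:
--         return False
--     if s == e:
--         return True
--     n = len(a)
--     for i in range(n - 1):
--         if a[i] == b[i] == s and a[i + 1] == b[i + 1] == e:
--             return True
--     return False
-- ===== SOURCE B (Python) =====
-- def solve(a, b):
--     s, e = a[0], a[-1]
--     if (b[0], b[-1]) != (s, e):
--         return False
--     if s == e:
--         return True
--     trans = lambda xs: {i for i in range(len(xs) - 1) if (xs[i], xs[i + 1]) == (s, e)}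
--     return bool(trans(a) & trans(b))
-- ===== Notes on version B (the rewrite author's own statement) =====
-- stated objective: alternative
-- what changed: The fused index-by-index scan comparing a and b simultaneously with early return is replaced by building the set of s->e transition positions of each array separately and intersecting the two sets.
-- outside the precondition, e.g. on solve([1, 2, 2], [1, 2]): A returns True, B returns True; on solve([1, 3, 3, 2], [1, 2]): A raises IndexError, B returns False
import Mathlib
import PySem

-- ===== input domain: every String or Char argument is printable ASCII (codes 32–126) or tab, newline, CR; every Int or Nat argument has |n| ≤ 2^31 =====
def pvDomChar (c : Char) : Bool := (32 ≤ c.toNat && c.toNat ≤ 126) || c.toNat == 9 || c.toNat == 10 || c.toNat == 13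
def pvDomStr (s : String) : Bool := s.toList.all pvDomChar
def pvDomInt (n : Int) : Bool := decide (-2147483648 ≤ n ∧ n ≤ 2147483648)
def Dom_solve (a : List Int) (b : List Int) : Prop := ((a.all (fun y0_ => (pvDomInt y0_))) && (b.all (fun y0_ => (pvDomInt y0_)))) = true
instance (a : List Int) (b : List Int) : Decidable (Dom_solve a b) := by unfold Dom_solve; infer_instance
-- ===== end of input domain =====

-- B replaces A's fused simultaneous scan of a and b by two independent transition-position
-- set comprehensions intersected at the end (objective: alternative, same cost).

-- ===== PORT A =====
-- the for-loop with early return; 'none' branches are Python's IndexError paths (excluded by Pre_solve)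
def solveLoop (a b : List Int) (s e : Int) : List Int → Bool
  | [] => false
  | i :: rest =>
    match PySem.List.pyGet? a i, PySem.List.pyGet? b i with
    | some ai, some bi =>
      if ai == bi && bi == s then
        match PySem.List.pyGet? a (i + 1), PySem.List.pyGet? b (i + 1) with
        | some ai1, some bi1 =>
          if ai1 == bi1 && bi1 == e then true else solveLoop a b s e rest
        | _, _ => false
      else solveLoop a b s e rest
    | _, _ => false

def solve (a : List Int) (b : List Int) : Bool :=
  match PySem.List.pyGet? a 0, PySem.List.pyGet? a (-1),
        PySem.List.pyGet? b 0, PySem.List.pyGet? b (-1) with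
  | some s, some e, some b0, some bl =>
    if b0 != s || bl != e then false
    else if s == e then true
    else solveLoop a b s e (PySem.List.pyRange 0 ((a.length : Int) - 1) 1)
  | _, _, _, _ => false

-- ===== PORT B =====
-- trans = lambda xs: {i for i in range(len(xs)-1) if (xs[i], xs[i+1]) == (s, e)}
def transitions (s e : Int) (xs : List Int) : PySem.Set Int :=
  PySem.Set.ofList ((PySem.List.pyRange 0 ((xs.length : Int) - 1) 1).filter
    (fun i => (PySem.List.pyGetD xs i 0, PySem.List.pyGetD xs (i + 1) 0) == (s, e)))

def solve_alt (a : List Int) (b : List Int) : Bool :=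
  match PySem.List.pyGet? a 0, PySem.List.pyGet? a (-1),
        PySem.List.pyGet? b 0, PySem.List.pyGet? b (-1) with
  | some s, some e, some b0, some bl =>
    if (b0, bl) != (s, e) then false
    else if s == e then true
    else !(PySem.Set.inter (transitions s e a) (transitions s e b)).isEmpty
  | _, _, _, _ => false

-- ===== PRECONDITION & SPEC =====
-- Pre_ excludes empty lists (A raises IndexError on a[0]/b[0]) and the inputs with
-- len(b) < len(a) on which the loop does not return via a guard or the s==e shortcut:
-- in that region A's loop may read b out of range and raise IndexError (it does return
-- on a few of them — see the cites — and B agrees with A there as well).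
def Pre_solve (a : List Int) (b : List Int) : Prop :=
  a ≠ [] ∧ b ≠ [] ∧
  (a.length ≤ b.length ∨
   PySem.List.pyGet? b 0 ≠ PySem.List.pyGet? a 0 ∨
   PySem.List.pyGet? b (-1) ≠ PySem.List.pyGet? a (-1) ∨
   PySem.List.pyGet? a 0 = PySem.List.pyGet? a (-1))
instance (a : List Int) (b : List Int) : Decidable (Pre_solve a b) := by
  unfold Pre_solve; infer_instance
def pvWitness_solve : List Int × List Int := ([1, 2, 3], [1, 0, 3])

def Spec_solve (a : List Int) (b : List Int) (out : Bool) : Prop := out = solve_alt a b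
instance (a : List Int) (b : List Int) (out : Bool) : Decidable (Spec_solve a b out) := by
  unfold Spec_solve; infer_instance

-- ===== CLAIM (what is proved, stated in full; the proofs are below) =====
def Claim_equal_solve : Prop := ∀ (a : List Int) (b : List Int), Dom_solve a b → Pre_solve a b → Spec_solve a b (solve a b)

-- ===== LEMMAS AND PROOFS =====

theorem pyGet?_eq_some_pyGetD (xs : List Int) (i : Int) (h0 : 0 ≤ i) (h : i < (xs.length : Int)) :
    PySem.List.pyGet? xs i = some (PySem.List.pyGetD xs i 0) := by
  simp only [PySem.List.pyGet?, PySem.List.pyGetD, PySem.List.pyIdx?, if_pos h0, if_pos h,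
    Option.bind_some]
  rw [List.getElem?_eq_getElem (by omega)]
  rfl

theorem chain_eq (x y x1 y1 s e : Int) (r : Bool) :
    (if x == y && y == s then (if x1 == y1 && y1 == e then true else r) else r)
      = (((x == s && x1 == e) && (y == s && y1 == e)) || r) := by
  by_cases hxs : x = s <;> by_cases hys : y = s <;>
    by_cases hx1 : x1 = e <;> by_cases hy1 : y1 = e <;>
      simp [hxs, hys, hx1, hy1]

def pA (xs : List Int) (s e : Int) (i : Int) : Bool :=
  PySem.List.pyGetD xs i 0 == s && PySem.List.pyGetD xs (i + 1) 0 == e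

theorem loop_eq (a b : List Int) (s e : Int) (l : List Int)
    (hmem : ∀ i ∈ l, 0 ≤ i ∧ i + 1 < (a.length : Int) ∧ i + 1 < (b.length : Int)) :
    solveLoop a b s e l = l.any (fun i => pA a s e i && pA b s e i) := by
  induction l with
  | nil => simp [solveLoop]
  | cons i l ih =>
    obtain ⟨h0, ha, hb⟩ := hmem i (List.mem_cons_self)
    show solveLoop a b s e (i :: l) = _
    unfold solveLoop
    rw [pyGet?_eq_some_pyGetD a i h0 (by omega), pyGet?_eq_some_pyGetD b i h0 (by omega),
        pyGet?_eq_some_pyGetD a (i + 1) (by omega) ha, pyGet?_eq_some_pyGetD b (i + 1) (by omega) hb]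
    simp only []
    rw [chain_eq, List.any_cons, ih (fun j hj => hmem j (List.mem_cons_of_mem _ hj))]
    simp [pA]

theorem trans_mem (xs : List Int) (s e : Int) (i : Int) :
    i ∈ transitions s e xs ↔ (0 ≤ i ∧ i < (xs.length : Int) - 1) ∧ pA xs s e i = true := by
  unfold transitions
  rw [PySem.Set.mem_ofList, List.mem_filter, PySem.List.mem_pyRange_one]
  simp [pA]

-- ===== VERDICT (by name: the statement is the Claim_ definition above) =====
theorem solve_spec : Claim_equal_solve := by
  intro a b _ hpre
  unfold Spec_solve solve solve_alt
  obtain ⟨hane, hbne, hdisj⟩ := hpre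
  obtain ⟨s, hs⟩ : ∃ s, PySem.List.pyGet? a 0 = some s := by
    rw [PySem.List.pyGet?_zero]; cases a with
    | nil => exact absurd rfl hane
    | cons x xs => exact ⟨x, rfl⟩
  obtain ⟨e, he⟩ : ∃ e, PySem.List.pyGet? a (-1) = some e := by
    rw [PySem.List.pyGet?_neg_one]
    exact ⟨a.getLast hane, List.getLast?_eq_some_getLast hane⟩
  obtain ⟨b0, hb0⟩ : ∃ b0, PySem.List.pyGet? b 0 = some b0 := by
    rw [PySem.List.pyGet?_zero]; cases b with
    | nil => exact absurd rfl hbne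
    | cons x xs => exact ⟨x, rfl⟩
  obtain ⟨bl, hbl⟩ : ∃ bl, PySem.List.pyGet? b (-1) = some bl := by
    rw [PySem.List.pyGet?_neg_one]
    exact ⟨b.getLast hbne, List.getLast?_eq_some_getLast hbne⟩
  rw [hs, he, hb0, hbl]
  simp only []
  by_cases hg : b0 = s ∧ bl = e
  case neg =>
    have h1 : (b0 != s || bl != e) = true := by
      rcases not_and_or.mp hg with h | h <;> simp [h]
    have h2 : ((b0, bl) != (s, e)) = true := by simpa using hg
    rw [h1, h2]
    simp only [if_true]
  case pos =>
    obtain ⟨hb0s, hble⟩ := hg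
    subst hb0s hble
    simp only [bne_self_eq_false, Bool.or_self, Bool.false_eq_true, if_false]
    by_cases hse : (b0 == bl) = true
    · simp only [hse, if_true]
    · simp only [hse, Bool.false_eq_true, if_false]
      have hsne : b0 ≠ bl := by simpa using hse
      have hlen : (a.length : Int) ≤ (b.length : Int) := by
        rcases hdisj with h | h | h | h
        · exact_mod_cast h
        · exact absurd (by rw [hb0, hs]) h
        · exact absurd (by rw [hbl, he]) h
        · rw [hs, he] at h; exact absurd (Option.some.inj h) hsne
      rw [loop_eq a b b0 bl _ (fun i hi => by
        rw [PySem.List.mem_pyRange_one] at hi; exact ⟨hi.1, by omega, by omega⟩)]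
      rw [Bool.eq_iff_iff, List.any_eq_true, Bool.not_eq_true', List.isEmpty_eq_false_iff_exists_mem]
      constructor
      · rintro ⟨i, hi, hp⟩
        rw [PySem.List.mem_pyRange_one] at hi
        rw [Bool.and_eq_true] at hp
        refine ⟨i, (PySem.Set.mem_inter _ _ _).mpr ⟨?_, ?_⟩⟩
        · exact (trans_mem a b0 bl i).mpr ⟨⟨hi.1, hi.2⟩, hp.1⟩
        · exact (trans_mem b b0 bl i).mpr ⟨⟨hi.1, by omega⟩, hp.2⟩
      · rintro ⟨i, hi⟩
        obtain ⟨hia, hib⟩ := (PySem.Set.mem_inter _ _ _).mp hi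
        obtain ⟨⟨h0, hlt⟩, hpa⟩ := (trans_mem a b0 bl i).mp hia
        obtain ⟨_, hpb⟩ := (trans_mem b b0 bl i).mp hib
        exact ⟨i, PySem.List.mem_pyRange_one.mpr ⟨h0, hlt⟩,
          by rw [Bool.and_eq_true]; exact ⟨hpa, hpb⟩⟩
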